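-- pv_equiv track=rewrite | github.com/Lakshayb143/ball_detection_tracking | scripts/benchmark_groundingdino_ball_tracking.py | fragmentation_count
-- ===== SOURCE A (Python) =====
-- from typing import Dict, Iterable, List, Optional, Sequence, Tuple
--
-- def fragmentation_count(match_series: Sequence[bool]) -> int:
--     segments = 0
--     in_match = False
--     for matched in match_series:
--         if matched and not in_match:
--             segments += 1
--             in_match = True
--         elif not matched:
--             in_match = False
--     return max(0, segments - 1)
-- ===== SOURCE B (Python) =====
-- def fragmentation_count(match_series):
--     idx = [i for i, m in enumerate(match_series) if m]
--     return sum(1 for a, b in zip(idx, idx[1:]) if b - a > 1)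
-- ===== Notes on version B (the rewrite author's own statement) =====
-- stated objective: alternative
-- what changed: Instead of running a state machine that counts segment starts and subtracting one, B first collects the indices of truthy elements and then counts internal gaps, i.e. consecutive truthy-index pairs more than 1 apart; no segment counter, flag, or max(0,...-1) correction is needed.
import Mathlib
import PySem

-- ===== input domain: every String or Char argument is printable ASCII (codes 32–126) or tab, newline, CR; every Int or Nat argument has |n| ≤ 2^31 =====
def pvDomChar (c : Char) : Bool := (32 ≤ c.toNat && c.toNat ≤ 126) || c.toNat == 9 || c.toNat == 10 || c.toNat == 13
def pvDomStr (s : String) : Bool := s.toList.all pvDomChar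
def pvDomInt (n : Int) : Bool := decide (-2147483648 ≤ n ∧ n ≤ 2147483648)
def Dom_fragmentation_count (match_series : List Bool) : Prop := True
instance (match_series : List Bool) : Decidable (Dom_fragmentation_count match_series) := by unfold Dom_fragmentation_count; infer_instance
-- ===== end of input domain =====

-- B collects the truthy indices and counts internal gaps between consecutive ones, instead of A's segment-counting state machine (objective: alternative).

-- ===== PORT A =====
def fragmentation_count (match_series : List Bool) : Int :=
  let st := match_series.foldl
    (fun (st : Int × Bool) matched =>
      if matched && !st.2 then (st.1 + 1, true)
      else if !matched then (st.1, false)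
      else st)
    (0, false)
  max 0 (st.1 - 1)

-- ===== PORT B =====
def fragmentation_count_alt (match_series : List Bool) : Int :=
  let idx := ((PySem.List.enumerate match_series).filter (fun p => p.2)).map (fun p => p.1)
  -- idx[1:] is idx.tail (PySem.List.slice_from_one); sum of the genexpr is this fold
  ((idx.zip idx.tail).foldl (fun (c : Int) ab => if ab.2 - ab.1 > 1 then c + 1 else c) 0)

-- ===== PRECONDITION & SPEC =====
def Spec_fragmentation_count (match_series : List Bool) (out : Int) : Prop := out = fragmentation_count_alt match_series
instance (match_series : List Bool) (out : Int) : Decidable (Spec_fragmentation_count match_series out) := by unfold Spec_fragmentation_count; infer_instance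

-- ===== CLAIM =====
def Claim_equal_fragmentation_count : Prop := ∀ (match_series : List Bool), Dom_fragmentation_count match_series → Spec_fragmentation_count match_series (fragmentation_count match_series)

-- ===== LEMMAS AND PROOFS =====

-- rising-edge count of A's loop (previous element p)
def pvEdges : List Bool → Bool → Int
  | [], _ => 0
  | x :: xs, p => (if x && !p then 1 else 0) + pvEdges xs x

-- indices (starting at n) of the true elements
def pvIdxFrom (n : Int) : List Bool → List Int
  | [] => []
  | true :: xs => n :: pvIdxFrom (n + 1) xs
  | false :: xs => pvIdxFrom (n + 1) xs

def pvGaps (idx : List Int) : Int :=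
  (idx.zip idx.tail).foldl (fun (c : Int) ab => if ab.2 - ab.1 > 1 then c + 1 else c) 0

theorem pvGaps_cons_cons (a b : Int) (rest : List Int) :
    pvGaps (a :: b :: rest) = (if b - a > 1 then 1 else 0) + pvGaps (b :: rest) := by
  have h : ∀ (l : List (Int × Int)) (s t : Int),
      l.foldl (fun (c : Int) ab => if ab.2 - ab.1 > 1 then c + 1 else c) (s + t)
        = s + l.foldl (fun (c : Int) ab => if ab.2 - ab.1 > 1 then c + 1 else c) t := by
    intro l
    induction l with
    | nil => intro s t; rfl
    | cons x xs ih =>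
      intro s t
      simp only [List.foldl_cons]
      split_ifs <;> [rw [show s + t + 1 = s + (t + 1) by ring, ih]; exact ih s t]
  simp only [pvGaps, List.tail_cons, List.zip_cons_cons, List.foldl_cons]
  split_ifs with hb
  · rw [show (0 : Int) + 1 = 1 + 0 by ring, h]
  · simp

theorem pvEdges_nonneg (xs : List Bool) (p : Bool) : 0 ≤ pvEdges xs p := by
  induction xs generalizing p with
  | nil => simp [pvEdges]
  | cons x xs ih =>
    simp only [pvEdges]
    have := ih x
    split_ifs <;> omega

-- with a sentinel last-true index l < n, gaps counts exactly the rising edges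
theorem pvGaps_sentinel (xs : List Bool) : ∀ (n l : Int), l + 1 ≤ n →
    pvGaps (l :: pvIdxFrom n xs) = pvEdges xs (decide (l = n - 1)) := by
  induction xs with
  | nil => intro n l _; simp [pvIdxFrom, pvEdges, pvGaps]
  | cons x xs ih =>
    intro n l hl
    cases x with
    | true =>
      simp only [pvIdxFrom, pvEdges, pvGaps_cons_cons]
      rw [ih (n + 1) n (by omega)]
      have : decide (n = n + 1 - 1) = true := by simp
      rw [this]
      by_cases h : l = n - 1
      · have : ¬ (n - l > 1) := by omega
        simp [h, this]
      · have : n - l > 1 := by omega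
        simp [h, this]
    | false =>
      simp only [pvIdxFrom, pvEdges]
      rw [ih (n + 1) l (by omega)]
      have h1 : decide (l = n + 1 - 1) = false := by simp; omega
      rw [h1]
      simp

theorem pvEdges_zero_of_idx_nil (xs : List Bool) : ∀ (n : Int) (p : Bool),
    pvIdxFrom n xs = [] → pvEdges xs p = 0 := by
  induction xs with
  | nil => intro n p _; rfl
  | cons x xs ih =>
    intro n p h
    cases x with
    | true => simp [pvIdxFrom] at h
    | false =>
      simp only [pvEdges]
      rw [ih (n + 1) false (by simpa [pvIdxFrom] using h)]
      simp

theorem pvGaps_idxFrom (xs : List Bool) : ∀ (n : Int),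
    pvGaps (pvIdxFrom n xs) = max 0 (pvEdges xs false - 1) := by
  induction xs with
  | nil => intro n; simp [pvIdxFrom, pvEdges, pvGaps]
  | cons x xs ih =>
    intro n
    cases x with
    | true =>
      simp only [pvIdxFrom]
      cases hxs : pvIdxFrom (n + 1) xs with
      | nil =>
        have hz := pvEdges_zero_of_idx_nil xs (n + 1) true hxs
        simp [pvGaps, pvEdges, hz]
      | cons y ys =>
        have hs := pvGaps_sentinel xs (n + 1) n (by omega)
        rw [hxs] at hs
        have h3 : decide (n = n + 1 - 1) = true := by simp
        rw [h3] at hs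
        have hnn := pvEdges_nonneg xs true
        rw [hs]
        simp only [pvEdges]
        simp
        omega
    | false =>
      simp only [pvIdxFrom, pvEdges]
      rw [ih (n + 1)]
      simp

-- A's fold computes s + pvEdges xs p
theorem pvFoldA (xs : List Bool) : ∀ (s : Int) (p : Bool),
    (xs.foldl
      (fun (st : Int × Bool) matched =>
        if matched && !st.2 then (st.1 + 1, true)
        else if !matched then (st.1, false)
        else st)
      (s, p)).1 = s + pvEdges xs p := by
  induction xs with
  | nil => intro s p; simp [pvEdges]
  | cons x xs ih =>
    intro s p
    rw [List.foldl_cons]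
    cases x with
    | false =>
      show (List.foldl _ (s, false) xs).1 = s + pvEdges (false :: xs) p
      rw [ih]; simp [pvEdges]
    | true =>
      cases p with
      | false =>
        show (List.foldl _ (s + 1, true) xs).1 = s + pvEdges (true :: xs) false
        rw [ih]; simp [pvEdges]; ring
      | true =>
        show (List.foldl _ (s, true) xs).1 = s + pvEdges (true :: xs) true
        rw [ih]; simp [pvEdges]

-- B's idx list is pvIdxFrom 0
theorem pvIdx_eq (xs : List Bool) : ∀ (n : Int),
    (((PySem.List.enumerate xs n).filter (fun p => p.2)).map (fun p => p.1)) = pvIdxFrom n xs := by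
  induction xs with
  | nil => intro n; simp [PySem.List.enumerate, pvIdxFrom]
  | cons x xs ih =>
    intro n
    cases x <;> simp [PySem.List.enumerate_cons, pvIdxFrom, ih]

-- ===== VERDICT =====
theorem fragmentation_count_spec : Claim_equal_fragmentation_count := by
  intro xs _
  show fragmentation_count xs = fragmentation_count_alt xs
  unfold fragmentation_count fragmentation_count_alt
  rw [pvIdx_eq]
  show max 0 (_ - 1) = pvGaps (pvIdxFrom 0 xs)
  rw [pvFoldA, pvGaps_idxFrom]
  simp
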